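-- pv_equiv track=rewrite | github.com/lwperic/weibiaoTool | services/graph_service.py | _split_cypher_statements
-- ===== SOURCE A (Python) =====
-- def _split_cypher_statements(cypher: str) -> list[str]:
--     """将包含多个语句的Cypher字符串分割为单个语句列表"""
--     if not cypher or not cypher.strip():
--         return []
--
--     # 按分号分割语句
--     statements = []
--     current_statement = ""
--
--     lines = cypher.split('\n')
--     for line in lines:
--         line = line.strip()
--         if not line:
--             continue
--
--         # 跳过注释行
--         if line.startswith('--'):
--             continue
--
--         current_statement += line + "\n"
--
--         # 如果行以分号结尾，说明一个语句结束
--         if line.endswith(';'):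
--             statements.append(current_statement.strip())
--             current_statement = ""
--
--     # 如果还有未完成的语句，添加它
--     if current_statement.strip():
--         statements.append(current_statement.strip())
--
--     return statements
-- ===== SOURCE B (Python) =====
-- def _split_cypher_statements(cypher: str) -> list[str]:
--     """Delimiter-search version: repeatedly find the next ';'-terminated line and slice."""
--     if not cypher or not cypher.strip():
--         return []
--
--     # cleaning pass: strip lines, drop empties and '--' comment lines
--     cleaned = [s for s in (ln.strip() for ln in cypher.split('\n'))
--                if s and not s.startswith('--')]
--
--     # repeatedly locate the next terminator line and cut the statement off by slicing
--     statements = []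
--     rest = cleaned
--     while rest:
--         i = next((k for k, l in enumerate(rest) if l.endswith(';')), None)
--         if i is None:
--             statements.append('\n'.join(rest))
--             break
--         statements.append('\n'.join(rest[:i + 1]))
--         rest = rest[i + 1:]
--     return statements
-- ===== Notes on version B (the rewrite author's own statement) =====
-- stated objective: alternative
-- what changed: Replaces A's streaming accumulator (append each line to a growing string, flush and re-strip on ';') by a cleaning pass followed by a delimiter-search loop that repeatedly finds the index of the next ';'-terminated line and slices a whole statement off at once, joined once per statement.
import Mathlib
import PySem

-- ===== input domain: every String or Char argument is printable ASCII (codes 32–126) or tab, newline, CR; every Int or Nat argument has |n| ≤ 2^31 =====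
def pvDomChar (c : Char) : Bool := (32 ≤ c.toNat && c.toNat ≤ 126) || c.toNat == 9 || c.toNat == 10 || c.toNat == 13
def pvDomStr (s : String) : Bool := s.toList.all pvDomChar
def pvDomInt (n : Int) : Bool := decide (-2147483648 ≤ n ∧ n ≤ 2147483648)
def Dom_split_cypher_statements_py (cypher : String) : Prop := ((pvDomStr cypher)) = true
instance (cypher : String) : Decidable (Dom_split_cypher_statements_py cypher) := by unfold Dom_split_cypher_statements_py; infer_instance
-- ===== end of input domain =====

-- B replaces A's streaming accumulator (grow a string, flush and re-strip at each ';') by a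
-- cleaning pass followed by a delimiter-search loop that finds the next ';'-terminated line
-- and slices a whole statement off at once (objective: alternative decomposition).

-- ===== PORT A =====
-- loop body of A: strip the line, skip empties and '--' comments, accumulate, flush on ';'
def pvStepA (acc : List (List Char) × List Char) (line0 : List Char) :
    List (List Char) × List Char :=
  let line := PySem.Chars.strip line0
  if line = [] then acc
  else if PySem.Chars.startswith line ['-', '-'] then acc
  else
    let current := acc.2 ++ line ++ ['\n']
    if PySem.Chars.endswith line [';'] then (acc.1 ++ [PySem.Chars.strip current], [])
    else (acc.1, current)

def split_cypher_statements_py (cypher : String) : List String :=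
  if cypher = "" ∨ PySem.Chars.strip cypher.toList = [] then []
  else
    let lines := PySem.Chars.splitOn cypher.toList ['\n']
    let r := lines.foldl pvStepA ([], [])
    let r := if PySem.Chars.strip r.2 ≠ [] then r.1 ++ [PySem.Chars.strip r.2] else r.1
    r.map String.ofList

-- ===== PORT B =====
-- B's while loop: find the index of the next ';'-terminated line, slice the statement off,
-- recurse on the remainder (the loop over `rest` becomes recursion on the shrinking list)
def pvGroups (rest : List (List Char)) : List (List Char) :=
  if hne : rest = [] then []
  else
    match rest.findIdx? (fun l => PySem.Chars.endswith l [';']) with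
    | none => [PySem.Chars.join ['\n'] rest]
    | some i =>
        PySem.Chars.join ['\n'] (rest.take (i + 1)) :: pvGroups (rest.drop (i + 1))
termination_by rest.length
decreasing_by
  simp only [List.length_drop]
  have : rest.length ≠ 0 := fun h => hne (List.eq_nil_of_length_eq_zero h)
  omega

def split_cypher_statements_py_alt (cypher : String) : List String :=
  if cypher = "" ∨ PySem.Chars.strip cypher.toList = [] then []
  else
    let cleaned := ((PySem.Chars.splitOn cypher.toList ['\n']).map PySem.Chars.strip).filter
      (fun s => !s.isEmpty && !PySem.Chars.startswith s ['-', '-'])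
    (pvGroups cleaned).map String.ofList

-- ===== PRECONDITION & SPEC =====
def Spec_split_cypher_statements_py (cypher : String) (out : List String) : Prop := out = split_cypher_statements_py_alt cypher
instance (cypher : String) (out : List String) : Decidable (Spec_split_cypher_statements_py cypher out) := by unfold Spec_split_cypher_statements_py; infer_instance

-- ===== CLAIM (what is proved, stated in full; the proofs are below) =====
def Claim_equal_split_cypher_statements_py : Prop := ∀ (cypher : String), Dom_split_cypher_statements_py cypher → Spec_split_cypher_statements_py cypher (split_cypher_statements_py cypher)

-- ===== LEMMAS AND PROOFS =====

theorem pvDropWhile_fix_append (p : Char → Bool) (xs : List Char) (h : xs.dropWhile p = xs)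
    (hne : xs ≠ []) (ys : List Char) : (xs ++ ys).dropWhile p = xs ++ ys := by
  cases xs with
  | nil => simp at hne
  | cons a t =>
    have hpa : p a = false := by
      by_contra hp
      simp only [List.dropWhile_cons] at h
      rw [if_pos (by simpa using hp)] at h
      have := congrArg List.length h
      have ht := List.length_dropWhile_le p t
      simp at this; omega
    simp [hpa]

-- clean l: stripped and nonempty
def pvClean (l : List Char) : Prop := PySem.Chars.strip l = l ∧ l ≠ []

theorem pvClean_parts {l : List Char} (h : pvClean l) :
    PySem.Chars.lstrip l = l ∧ PySem.Chars.rstrip l = l := by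
  obtain ⟨hs, hne⟩ := h
  have h1 : (PySem.Chars.lstrip l).length ≤ l.length := List.length_dropWhile_le _ l
  have h2 : (PySem.Chars.rstrip (PySem.Chars.lstrip l)).length ≤ (PySem.Chars.lstrip l).length := by
    simpa [PySem.Chars.rstrip] using List.length_dropWhile_le PySem.Chars.isspace (PySem.Chars.lstrip l).reverse
  have hlen : l.length ≤ (PySem.Chars.rstrip (PySem.Chars.lstrip l)).length := by
    rw [show PySem.Chars.rstrip (PySem.Chars.lstrip l) = l from hs]
  have hls : PySem.Chars.lstrip l = l := by
    have : PySem.Chars.lstrip l <:+ l := List.dropWhile_suffix _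
    exact this.eq_of_length (by omega)
  refine ⟨hls, ?_⟩
  have : PySem.Chars.strip l = PySem.Chars.rstrip l := by
    simp [PySem.Chars.strip, hls]
  rw [← this]; exact hs

theorem pvLstrip_fix_append {l : List Char} (h : pvClean l) (t : List Char) :
    PySem.Chars.lstrip (l ++ t) = l ++ t :=
  pvDropWhile_fix_append _ l (pvClean_parts h).1 h.2 t

theorem pvRstrip_fix_prepend {l : List Char} (h : pvClean l) (t : List Char) :
    PySem.Chars.rstrip (t ++ l) = t ++ l := by
  have hr : PySem.Chars.rstrip l = l := (pvClean_parts h).2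
  have : l.reverse.dropWhile PySem.Chars.isspace = l.reverse := by
    have := congrArg List.reverse hr
    simpa [PySem.Chars.rstrip] using this
  have := pvDropWhile_fix_append PySem.Chars.isspace l.reverse this (by simpa using h.2) t.reverse
  simp only [PySem.Chars.rstrip, List.reverse_append]
  rw [this]; simp

theorem pvRstrip_drop_space (X : List Char) (c : Char) (hc : PySem.Chars.isspace c = true) :
    PySem.Chars.rstrip (X ++ [c]) = PySem.Chars.rstrip X := by
  simp [PySem.Chars.rstrip, hc]

-- join append singleton
theorem pvJoin_append_singleton (sep : List Char) (bs : List (List Char)) (l : List Char)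
    (hbs : bs ≠ []) :
    PySem.Chars.join sep (bs ++ [l]) = PySem.Chars.join sep bs ++ sep ++ l := by
  induction bs with
  | nil => simp at hbs
  | cons b rest ih =>
    cases rest with
    | nil => simp [PySem.Chars.join, List.intercalate]
    | cons b' rest' =>
      have := ih (by simp)
      simp only [List.cons_append]
      simp only [List.cons_append] at this ⊢
      rw [PySem.Chars.join_cons_cons, this, PySem.Chars.join_cons_cons]
      simp

theorem pvJoin_cons_eq (sep b : List Char) (rest : List (List Char)) :
    ∃ t, PySem.Chars.join sep (b :: rest) = b ++ t := by
  cases rest with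
  | nil => exact ⟨[], by simp [PySem.Chars.join, List.intercalate]⟩
  | cons b' r => exact ⟨sep ++ PySem.Chars.join sep (b' :: r), by rw [PySem.Chars.join_cons_cons]; simp⟩

theorem pvJoin_ne_nil {bs : List (List Char)} (hbs : bs ≠ []) (hcl : ∀ l ∈ bs, pvClean l) :
    PySem.Chars.join ['\n'] bs ≠ [] := by
  cases bs with
  | nil => simp at hbs
  | cons b rest =>
    obtain ⟨t, ht⟩ := pvJoin_cons_eq ['\n'] b rest
    rw [ht]
    have : b ≠ [] := (hcl b (by simp)).2
    simp [this]

theorem pvStrip_join {bs : List (List Char)} (hbs : bs ≠ []) (hcl : ∀ l ∈ bs, pvClean l) :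
    PySem.Chars.strip (PySem.Chars.join ['\n'] bs ++ ['\n']) = PySem.Chars.join ['\n'] bs := by
  cases bs with
  | nil => simp at hbs
  | cons b rest =>
    obtain ⟨t, ht⟩ := pvJoin_cons_eq ['\n'] b rest
    have hls : PySem.Chars.lstrip (PySem.Chars.join ['\n'] (b :: rest) ++ ['\n'])
        = PySem.Chars.join ['\n'] (b :: rest) ++ ['\n'] := by
      rw [ht, List.append_assoc]
      exact pvLstrip_fix_append (hcl b (by simp)) _
    have hsp : PySem.Chars.isspace '\n' = true := by decide
    have hrs : PySem.Chars.rstrip (PySem.Chars.join ['\n'] (b :: rest) ++ ['\n'])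
        = PySem.Chars.rstrip (PySem.Chars.join ['\n'] (b :: rest)) :=
      pvRstrip_drop_space _ _ hsp
    have hrfix : PySem.Chars.rstrip (PySem.Chars.join ['\n'] (b :: rest))
        = PySem.Chars.join ['\n'] (b :: rest) := by
      obtain ⟨init, last, hil⟩ : ∃ init last, b :: rest = init ++ [last] :=
        ⟨(b :: rest).dropLast, (b :: rest).getLast (by simp), (List.dropLast_append_getLast (by simp)).symm⟩
      have hlast : pvClean last := hcl last (by rw [hil]; simp)
      cases init with
      | nil =>
        rw [hil, show PySem.Chars.join ['\n'] ([] ++ [last]) = [] ++ last by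
          simp [PySem.Chars.join, List.intercalate]]
        exact pvRstrip_fix_prepend hlast []
      | cons i0 is =>
        rw [hil, pvJoin_append_singleton _ _ _ (by simp)]
        exact pvRstrip_fix_prepend hlast _
    calc PySem.Chars.strip (PySem.Chars.join ['\n'] (b :: rest) ++ ['\n'])
        = PySem.Chars.rstrip (PySem.Chars.lstrip (PySem.Chars.join ['\n'] (b :: rest) ++ ['\n'])) := rfl
      _ = _ := by rw [hls, hrs, hrfix]

theorem pvStrip_idem (line : List Char) :
    PySem.Chars.strip (PySem.Chars.strip line) = PySem.Chars.strip line := by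
  set L := PySem.Chars.lstrip line with hL
  have hLfix : L.dropWhile PySem.Chars.isspace = L := List.dropWhile_idempotent _ _
  set S := PySem.Chars.rstrip L with hS
  have hSrev : S.reverse = L.reverse.dropWhile PySem.Chars.isspace := by
    simp [hS, PySem.Chars.rstrip]
  have hrsS : PySem.Chars.rstrip S = S := by
    have : S.reverse.dropWhile PySem.Chars.isspace = S.reverse := by
      rw [hSrev]; exact List.dropWhile_idempotent _ _
    simp [PySem.Chars.rstrip, this]
  have hlsS : PySem.Chars.lstrip S = S := by
    rcases heq : S with _ | ⟨a, t⟩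
    · rfl
    · have hpre : S <+: L := by
        have : S.reverse <:+ L.reverse := by rw [hSrev]; exact List.dropWhile_suffix _
        exact (List.reverse_suffix).1 (by simpa using this)
      have hLhead : ∃ u, L = a :: u := by
        obtain ⟨u, hu⟩ := hpre
        exact ⟨t ++ u, by rw [← hu, heq]; simp⟩
      obtain ⟨u, hu⟩ := hLhead
      have hpa : PySem.Chars.isspace a = false := by
        by_contra hp
        rw [hu] at hLfix
        simp only [List.dropWhile_cons] at hLfix
        rw [if_pos (by simpa using hp)] at hLfix
        have := congrArg List.length hLfix
        have := List.length_dropWhile_le PySem.Chars.isspace u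
        simp at *; omega
      simp [PySem.Chars.lstrip, hpa]
  show PySem.Chars.rstrip (PySem.Chars.lstrip S) = S
  rw [hlsS, hrsS]

theorem pvClean_strip {line : List Char} (h : PySem.Chars.strip line ≠ []) :
    pvClean (PySem.Chars.strip line) := ⟨pvStrip_idem line, h⟩

-- proof-only intermediate: the grouping of the cleaned lines as a left fold (a bridge
-- between A's accumulator loop and B's delimiter-search recursion)
def pvStepB (acc : List (List Char) × List (List Char)) (l : List Char) :
    List (List Char) × List (List Char) :=
  let buf := acc.2 ++ [l]
  if PySem.Chars.endswith l [';'] then (acc.1 ++ [PySem.Chars.join ['\n'] buf], [])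
  else (acc.1, buf)

def pvCur (buf : List (List Char)) : List Char :=
  if buf = [] then [] else PySem.Chars.join ['\n'] buf ++ ['\n']

def pvKeep (s : List Char) : Bool := !s.isEmpty && !PySem.Chars.startswith s ['-', '-']

theorem pvCur_push (buf : List (List Char)) (l : List Char) :
    pvCur buf ++ l ++ ['\n'] = pvCur (buf ++ [l]) := by
  by_cases h : buf = []
  · simp [h, pvCur]
  · simp only [pvCur, if_neg h, if_neg (by simp : ¬(buf ++ [l] = []))]
    rw [pvJoin_append_singleton _ _ _ h]

theorem pvFold_inv (lines : List (List Char)) (st buf : List (List Char))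
    (hcl : ∀ l ∈ buf, pvClean l) :
    lines.foldl pvStepA (st, pvCur buf)
        = ((((lines.map PySem.Chars.strip).filter pvKeep).foldl pvStepB (st, buf)).1,
           pvCur (((lines.map PySem.Chars.strip).filter pvKeep).foldl pvStepB (st, buf)).2)
      ∧ ∀ l ∈ (((lines.map PySem.Chars.strip).filter pvKeep).foldl pvStepB (st, buf)).2, pvClean l := by
  induction lines generalizing st buf with
  | nil => exact ⟨rfl, hcl⟩
  | cons line rest ih =>
    simp only [List.map_cons, List.filter_cons, List.foldl_cons]
    by_cases h0 : PySem.Chars.strip line = []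
    · rw [if_neg (by simp [pvKeep, h0])]
      rw [show pvStepA (st, pvCur buf) line = (st, pvCur buf) by simp [pvStepA, h0]]
      exact ih st buf hcl
    · by_cases h1 : PySem.Chars.startswith (PySem.Chars.strip line) ['-', '-'] = true
      · rw [if_neg (by simp [pvKeep, h1])]
        rw [show pvStepA (st, pvCur buf) line = (st, pvCur buf) by simp [pvStepA, h0, h1]]
        exact ih st buf hcl
      · rw [if_pos (by simp [pvKeep, h0, h1]), List.foldl_cons]
        have hclean : pvClean (PySem.Chars.strip line) := pvClean_strip h0
        have hcl' : ∀ l ∈ buf ++ [PySem.Chars.strip line], pvClean l := by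
          intro l hl
          rcases List.mem_append.1 hl with hl | hl
          · exact hcl l hl
          · simp at hl; subst hl; exact hclean
        by_cases h2 : PySem.Chars.endswith (PySem.Chars.strip line) [';'] = true
        · rw [show pvStepA (st, pvCur buf) line
              = (st ++ [PySem.Chars.strip (pvCur buf ++ PySem.Chars.strip line ++ ['\n'])], []) by
            simp [pvStepA, h0, h1, h2]]
          rw [show pvStepB (st, buf) (PySem.Chars.strip line)
              = (st ++ [PySem.Chars.join ['\n'] (buf ++ [PySem.Chars.strip line])], []) by
            simp [pvStepB, h2]]
          rw [pvCur_push, show PySem.Chars.strip (pvCur (buf ++ [PySem.Chars.strip line]))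
              = PySem.Chars.join ['\n'] (buf ++ [PySem.Chars.strip line]) by
            rw [show pvCur (buf ++ [PySem.Chars.strip line])
                = PySem.Chars.join ['\n'] (buf ++ [PySem.Chars.strip line]) ++ ['\n'] by
              simp [pvCur]]
            exact pvStrip_join (by simp) hcl']
          rw [show ([] : List Char) = pvCur [] from rfl]
          exact ih _ [] (by simp)
        · rw [show pvStepA (st, pvCur buf) line
              = (st, pvCur buf ++ PySem.Chars.strip line ++ ['\n']) by
            simp [pvStepA, h0, h1, h2]]
          rw [show pvStepB (st, buf) (PySem.Chars.strip line)
              = (st, buf ++ [PySem.Chars.strip line]) by simp [pvStepB, h2]]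
          rw [pvCur_push]
          exact ih st _ hcl'

-- finish B's fold: flush a nonempty buffer
def pvFin (p : List (List Char) × List (List Char)) : List (List Char) :=
  if p.2 = [] then p.1 else p.1 ++ [PySem.Chars.join ['\n'] p.2]

-- a fold over lines none of which ends with ';' only accumulates
theorem pvFold_no_semi (cs : List (List Char)) (st buf : List (List Char))
    (h : ∀ l ∈ cs, PySem.Chars.endswith l [';'] = false) :
    cs.foldl pvStepB (st, buf) = (st, buf ++ cs) := by
  induction cs generalizing buf with
  | nil => simp
  | cons c rest ih =>
    rw [List.foldl_cons,
        show pvStepB (st, buf) c = (st, buf ++ [c]) by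
          simp [pvStepB, h c (by simp)],
        ih _ (fun l hl => h l (by simp [hl]))]
    simp

-- the fold-with-flush over the cleaned lines IS B's delimiter-search recursion
theorem pvFold_eq_groups (n : Nat) (cs : List (List Char)) (hn : cs.length ≤ n)
    (st : List (List Char)) :
    pvFin (cs.foldl pvStepB (st, [])) = st ++ pvGroups cs := by
  induction n generalizing cs st with
  | zero =>
    have : cs = [] := List.eq_nil_of_length_eq_zero (Nat.le_zero.1 hn)
    subst this
    simp [pvFin, pvGroups]
  | succ n ih =>
    by_cases hne : cs = []
    · subst hne; simp [pvFin, pvGroups]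
    · rw [pvGroups, dif_neg hne]
      cases hidx : cs.findIdx? (fun l => PySem.Chars.endswith l [';']) with
      | none =>
        have hall : ∀ l ∈ cs, PySem.Chars.endswith l [';'] = false := by
          intro l hl
          have := List.findIdx?_eq_none_iff.1 hidx l hl
          simpa using this
        rw [pvFold_no_semi cs st [] hall]
        simp [pvFin, hne]
      | some i =>
        obtain ⟨hi, hpi, hprev⟩ := List.findIdx?_eq_some_iff_getElem.1 hidx
        have hsplit : cs = cs.take i ++ cs[i] :: cs.drop (i + 1) := by
          conv_lhs => rw [← List.take_append_drop i cs]
          rw [List.drop_eq_getElem_cons hi]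
        have htake : ∀ l ∈ cs.take i, PySem.Chars.endswith l [';'] = false := by
          intro l hl
          obtain ⟨j, hj, hjl⟩ := List.getElem_of_mem hl
          have hjlen : j < i := by simpa using (List.length_take_le i cs).trans_lt' hj
          have := hprev j hjlen
          rw [List.getElem_take] at hjl
          rw [hjl] at this
          simpa using this
        conv_lhs => rw [hsplit]
        rw [List.foldl_append, pvFold_no_semi _ st [] htake, List.foldl_cons,
            show pvStepB (st, [] ++ cs.take i) cs[i]
              = (st ++ [PySem.Chars.join ['\n'] (([] ++ cs.take i) ++ [cs[i]])], []) by
              simp [pvStepB, hpi]]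
        have htake1 : (cs.take i) ++ [cs[i]] = cs.take (i + 1) := by
          rw [List.take_succ, List.getElem?_eq_getElem hi]
          rfl
        have hlen : (cs.drop (i + 1)).length ≤ n := by
          rw [List.length_drop]; omega
        rw [ih (cs.drop (i + 1)) hlen _]
        simp [htake1]

theorem pv_main (cypher : String) :
    split_cypher_statements_py cypher = split_cypher_statements_py_alt cypher := by
  unfold split_cypher_statements_py split_cypher_statements_py_alt
  by_cases hg : cypher = "" ∨ PySem.Chars.strip cypher.toList = []
  · simp only [if_pos hg]
  · simp only [if_neg hg]
    have hlam : (fun s => !s.isEmpty && !PySem.Chars.startswith s ['-', '-']) = pvKeep := rfl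
    rw [hlam]
    obtain ⟨heq, hcl⟩ := pvFold_inv (PySem.Chars.splitOn cypher.toList ['\n']) [] [] (by simp)
    rw [show (([], []) : List (List Char) × List Char) = (([], pvCur []) : List (List Char) × List Char) from rfl,
        heq]
    set rB := (((PySem.Chars.splitOn cypher.toList ['\n']).map PySem.Chars.strip).filter pvKeep).foldl
      pvStepB ([], []) with hrB
    have hfin : pvFin rB = pvGroups
        (((PySem.Chars.splitOn cypher.toList ['\n']).map PySem.Chars.strip).filter pvKeep) := by
      have := pvFold_eq_groups
        (((PySem.Chars.splitOn cypher.toList ['\n']).map PySem.Chars.strip).filter pvKeep).length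
        (((PySem.Chars.splitOn cypher.toList ['\n']).map PySem.Chars.strip).filter pvKeep)
        (le_refl _) ([] : List (List Char))
      simpa [← hrB] using this
    by_cases hb : rB.2 = []
    · rw [← hfin]
      simp [hb, pvCur, pvFin, PySem.Chars.strip, PySem.Chars.lstrip, PySem.Chars.rstrip]
    · have hcur : pvCur rB.2 = PySem.Chars.join ['\n'] rB.2 ++ ['\n'] := by simp [pvCur, hb]
      have hstrip : PySem.Chars.strip (pvCur rB.2) = PySem.Chars.join ['\n'] rB.2 := by
        rw [hcur]; exact pvStrip_join hb hcl
      have hne : PySem.Chars.join ['\n'] rB.2 ≠ [] := pvJoin_ne_nil hb hcl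
      rw [← hfin]
      simp [hstrip, hne, pvFin, hb]

-- ===== VERDICT (by name: the statement is the Claim_ definition above) =====
theorem split_cypher_statements_py_spec : Claim_equal_split_cypher_statements_py := by
  intro cypher _
  exact pv_main cypher
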